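-- pv_equiv track=rewrite | github.com/tomoya-yamanokuchi/denoising_diffusion_pytorch | denoising_diffusion_pytorch/policy/cutting_surface_planner_v9_hachi.py | find_nonzero_indices_both_1
-- ===== SOURCE A (Python) =====
-- def find_nonzero_indices_both_1(lst, start_index):
--     forward_index = -1
--     backward_index = -1
--
--     # Search forward from start_index + 1
--     for i in range(start_index + 1, len(lst)):
--         if lst[i] != 0:
--             forward_index = i
--             break
--
--     # Search backward from start_index - 1
--     for i in range(start_index - 1, -1, -1):
--         if lst[i] != 0:
--             backward_index = i
--             break
--     if backward_index == -1:
--         backward_index=0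
--     elif forward_index==-1:
--         forward_index=len(lst)
--
--     return forward_index, backward_index
-- ===== SOURCE B (Python) =====
-- # B: one enumerate pass builds the sorted table nz of nonzero positions; the two
-- # directional break-scans of A are replaced by neighbour selection in that table
-- # (first entry > start_index, last entry < start_index), then the same fixup.
-- def find_nonzero_indices_both_1(lst, start_index):
--     nz = [i for i, v in enumerate(lst) if v != 0]
--     forward_index = next((i for i in nz if i > start_index), -1)
--     backward_index = next((j for j in reversed(nz) if j < start_index), -1)
--     if backward_index == -1:
--         backward_index = 0
--     elif forward_index == -1:
--         forward_index = len(lst)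
--     return forward_index, backward_index
-- ===== Notes on version B (the rewrite author's own statement) =====
-- stated objective: alternative
-- what changed: A's two opposite-direction index scans with early break (and Python negative-index access) are replaced by a single enumerate pass building the sorted table of nonzero positions, from which the nearest neighbours above and below start_index are selected; the asymmetric fixup is kept.
-- intended difference: For start_index <= -2 with a nonzero among the last -start_index-1 elements, A's forward scan wraps around via Python negative indexing and returns that negative index as forward_index, while B returns the index of the first nonzero element of the list, which is the intended 'nearest nonzero forward of start' value. — e.g. on find_nonzero_indices_both_1([0, 1], -2): A returns (-1, 0), B returns (1, 0)
import Mathlib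
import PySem

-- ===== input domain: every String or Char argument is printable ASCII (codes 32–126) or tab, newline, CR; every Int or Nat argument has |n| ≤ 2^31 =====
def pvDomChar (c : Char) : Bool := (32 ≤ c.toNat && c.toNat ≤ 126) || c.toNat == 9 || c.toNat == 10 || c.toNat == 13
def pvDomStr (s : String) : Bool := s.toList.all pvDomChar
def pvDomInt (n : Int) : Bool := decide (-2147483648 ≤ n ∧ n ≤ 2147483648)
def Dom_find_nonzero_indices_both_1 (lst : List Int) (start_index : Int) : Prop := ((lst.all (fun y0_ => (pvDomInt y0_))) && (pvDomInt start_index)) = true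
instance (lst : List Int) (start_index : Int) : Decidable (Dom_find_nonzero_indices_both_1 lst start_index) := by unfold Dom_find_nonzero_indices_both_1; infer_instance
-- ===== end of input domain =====

-- B replaces A's two opposite-direction break-scans by one enumerate pass building the
-- sorted table of nonzero positions plus neighbour selection (alternative decomposition,
-- same cost); on start_index <= -2 A's forward scan wraps via negative indexing (D_ below).


-- ===== PORT A =====
-- the shared shape of A's two 'for i in range(...): if lst[i] != 0: <res> = i; break' loops;
-- lst[i] is pyGetD (default 0): exact wherever the index is in range, i.e. on all of Pre_
def pvScanA (lst : List Int) : List Int → Int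
  | [] => -1
  | i :: rest => if PySem.List.pyGetD lst i 0 ≠ 0 then i else pvScanA lst rest

def find_nonzero_indices_both_1 (lst : List Int) (start_index : Int) : Int × Int :=
  let forward_index := pvScanA lst (PySem.List.pyRange (start_index + 1) (lst.length : Int) 1)
  let backward_index := pvScanA lst (PySem.List.pyRange (start_index - 1) (-1) (-1))
  if backward_index = -1 then (forward_index, 0)
  else if forward_index = -1 then ((lst.length : Int), backward_index)
  else (forward_index, backward_index)

-- ===== PORT B =====
-- nz = [i for i, v in enumerate(lst) if v != 0]
def pvNz (lst : List Int) : List Int :=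
  (PySem.List.enumerate lst 0).filterMap (fun p => if p.2 ≠ 0 then some p.1 else none)

def find_nonzero_indices_both_1_alt (lst : List Int) (start_index : Int) : Int × Int :=
  let nz := pvNz lst
  let forward_index := (nz.find? (fun i => decide (start_index < i))).getD (-1)
  let backward_index := (nz.reverse.find? (fun i => decide (i < start_index))).getD (-1)
  if backward_index = -1 then (forward_index, 0)
  else if forward_index = -1 then ((lst.length : Int), backward_index)
  else (forward_index, backward_index)

-- ===== PRECONDITION & SPEC =====
-- Pre_ excludes exactly the inputs where A raises IndexError: start_index > len(lst)
-- (backward scan reads lst[i] with i ≥ len) or start_index < -len(lst)-1 (forward scan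
-- reads lst[i] with i < -len).
def Pre_find_nonzero_indices_both_1 (lst : List Int) (start_index : Int) : Prop :=
  -(lst.length : Int) - 1 ≤ start_index ∧ start_index ≤ (lst.length : Int)
instance (lst : List Int) (start_index : Int) : Decidable (Pre_find_nonzero_indices_both_1 lst start_index) := by unfold Pre_find_nonzero_indices_both_1; infer_instance
def pvWitness_find_nonzero_indices_both_1 : List Int × Int := ([1, 0, 2], 1)


-- On start_index ≤ -2 with a nonzero among the last -start_index-1 elements, A's forward
-- scan wraps around via Python negative indexing and returns that negative index, while B
-- returns the index of the first nonzero element — the intended nearest-forward value.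
def D_find_nonzero_indices_both_1 (lst : List Int) (start_index : Int) : Prop :=
  start_index ≤ -2 ∧ ∃ x ∈ lst.drop (((lst.length : Int) + start_index + 1).toNat), x ≠ 0
instance (lst : List Int) (start_index : Int) : Decidable (D_find_nonzero_indices_both_1 lst start_index) := by unfold D_find_nonzero_indices_both_1; infer_instance

def Spec_find_nonzero_indices_both_1 (lst : List Int) (start_index : Int) (out : Int × Int) : Prop := ¬ D_find_nonzero_indices_both_1 lst start_index → out = find_nonzero_indices_both_1_alt lst start_index
instance (lst : List Int) (start_index : Int) (out : Int × Int) : Decidable (Spec_find_nonzero_indices_both_1 lst start_index out) := by unfold Spec_find_nonzero_indices_both_1; infer_instance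

def pvDiffWitness_find_nonzero_indices_both_1 : List Int × Int := ([0, 1], -2)
def pvDiffWitnessOut_find_nonzero_indices_both_1 : (Int × Int) × (Int × Int) := ((-1, 0), (1, 0))

-- ===== CLAIM (what is proved, stated in full; the proofs are below) =====
def Claim_unchanged_find_nonzero_indices_both_1 : Prop := ∀ (lst : List Int) (start_index : Int), Dom_find_nonzero_indices_both_1 lst start_index → Pre_find_nonzero_indices_both_1 lst start_index → Spec_find_nonzero_indices_both_1 lst start_index (find_nonzero_indices_both_1 lst start_index)
def Claim_changed_find_nonzero_indices_both_1 : Prop := Dom_find_nonzero_indices_both_1 (pvDiffWitness_find_nonzero_indices_both_1.1) (pvDiffWitness_find_nonzero_indices_both_1.2) ∧ Pre_find_nonzero_indices_both_1 (pvDiffWitness_find_nonzero_indices_both_1.1) (pvDiffWitness_find_nonzero_indices_both_1.2) ∧ D_find_nonzero_indices_both_1 (pvDiffWitness_find_nonzero_indices_both_1.1) (pvDiffWitness_find_nonzero_indices_both_1.2) ∧ find_nonzero_indices_both_1 (pvDiffWitness_find_nonzero_indices_both_1.1) (pvDiffWitness_find_nonzero_indices_both_1.2) = pvDiffWitnessOut_find_nonzero_indices_both_1.1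 ∧ find_nonzero_indices_both_1_alt (pvDiffWitness_find_nonzero_indices_both_1.1) (pvDiffWitness_find_nonzero_indices_both_1.2) = pvDiffWitnessOut_find_nonzero_indices_both_1.2 ∧ pvDiffWitnessOut_find_nonzero_indices_both_1.1 ≠ pvDiffWitnessOut_find_nonzero_indices_both_1.2
def Claim_exact_find_nonzero_indices_both_1 : Prop := ∀ (lst : List Int) (start_index : Int), Dom_find_nonzero_indices_both_1 lst start_index → Pre_find_nonzero_indices_both_1 lst start_index → D_find_nonzero_indices_both_1 lst start_index → find_nonzero_indices_both_1 lst start_index ≠ find_nonzero_indices_both_1_alt lst start_index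

-- ===== LEMMAS AND PROOFS =====

theorem pvScanA_eq_find? (lst : List Int) (idxs : List Int) :
    pvScanA lst idxs = (idxs.find? (fun i => decide (PySem.List.pyGetD lst i 0 ≠ 0))).getD (-1) := by
  induction idxs with
  | nil => rfl
  | cons i rest ih =>
    by_cases h : PySem.List.pyGetD lst i 0 ≠ 0 <;> simp [pvScanA, h, ih]

theorem pvFind?_congr {α : Type} (l : List α) (p q : α → Bool) (h : ∀ x ∈ l, p x = q x) :
    l.find? p = l.find? q := by
  induction l with
  | nil => rfl
  | cons a l ih =>
    rw [List.find?_cons, List.find?_cons, h a (List.mem_cons_self ..),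
        ih (fun x hx => h x (List.mem_cons_of_mem _ hx))]

theorem pvEnumFM (xs : List Int) (a : Int) :
    (PySem.List.enumerate xs a).filterMap (fun p => if p.2 ≠ 0 then some p.1 else none)
      = (PySem.List.pyRange a (a + xs.length) 1).filter
          (fun i => decide (xs.getD (i - a).toNat 0 ≠ 0)) := by
  induction xs generalizing a with
  | nil => simp [PySem.List.enumerate_nil, PySem.List.pyRange_one_eq_nil (le_refl a)]
  | cons x xs ih =>
    rw [PySem.List.enumerate_cons, List.filterMap_cons,
        PySem.List.pyRange_one_cons (by simp), List.filter_cons]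
    have htail : (PySem.List.pyRange (a+1) (a + ((x :: xs).length : Nat)) 1).filter
          (fun i => decide ((x :: xs).getD (i - a).toNat 0 ≠ 0))
        = (PySem.List.enumerate xs (a+1)).filterMap (fun p => if p.2 ≠ 0 then some p.1 else none) := by
      have hb : a + (((x :: xs).length : Nat) : Int) = (a+1) + ((xs.length : Nat) : Int) := by
        simp; omega
      rw [hb, ih]
      apply List.filter_congr
      intro i hi
      rw [PySem.List.mem_pyRange_one] at hi
      have h1 : (i - a).toNat = (i - (a+1)).toNat + 1 := by omega
      rw [h1, List.getD_cons_succ]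
    have hhead : (x :: xs).getD (a - a).toNat 0 = x := by
      have h0 : (a - a).toNat = 0 := by omega
      rw [h0]; rfl
    by_cases hx : x = 0
    · subst hx
      simp only [ne_eq, not_true_eq_false, reduceIte, hhead, decide_false,
        Bool.false_eq_true]
      rw [htail]
    · simp only [ne_eq, hx, not_false_eq_true, hhead, decide_true, if_pos]
      rw [htail]

theorem pvNz_eq (lst : List Int) :
    pvNz lst = (PySem.List.pyRange 0 (lst.length : Int) 1).filter
        (fun i => decide (PySem.List.pyGetD lst i 0 ≠ 0)) := by
  unfold pvNz
  rw [pvEnumFM lst 0]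
  have h0 : (0 : Int) + ((lst.length : Nat) : Int) = (lst.length : Int) := by simp
  rw [h0]
  apply List.filter_congr
  intro i hi
  rw [PySem.List.mem_pyRange_one] at hi
  have hv : lst.getD (i - 0).toNat 0 = PySem.List.pyGetD lst i 0 := by
    rw [sub_zero, PySem.List.pyGetD_eq_getElem lst 0 hi.1 hi.2,
        List.getD_eq_getElem _ _ (by omega)]
  rw [hv]

theorem pvNz_mem (lst : List Int) (i : Int) (h : i ∈ pvNz lst) :
    0 ≤ i ∧ i < (lst.length : Int) ∧ PySem.List.pyGetD lst i 0 ≠ 0 := by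
  rw [pvNz_eq, List.mem_filter] at h
  obtain ⟨h1, h2⟩ := h
  rw [PySem.List.mem_pyRange_one] at h1
  simp at h2
  exact ⟨h1.1, h1.2, h2⟩

-- forward scan = first table entry > s, for 0 ≤ s+1 ≤ len
theorem pvForward_eq (lst : List Int) (s : Int) (h0 : 0 ≤ s + 1) (h1 : s + 1 ≤ (lst.length : Int)) :
    pvScanA lst (PySem.List.pyRange (s + 1) (lst.length : Int) 1)
      = ((pvNz lst).find? (fun i => decide (s < i))).getD (-1) := by
  rw [pvScanA_eq_find?, pvNz_eq, List.find?_filter,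
      PySem.List.pyRange_one_append 0 (s+1) (lst.length : Int) h0 h1,
      List.find?_append]
  have hnone : (PySem.List.pyRange 0 (s+1) 1).find?
      (fun a => decide ((decide (PySem.List.pyGetD lst a 0 ≠ 0)) = true ∧ (decide (s < a)) = true)) = none := by
    rw [List.find?_eq_none]
    intro x hx
    rw [PySem.List.mem_pyRange_one] at hx
    simp
    intro _
    omega
  rw [hnone, Option.none_or]
  congr 1
  apply pvFind?_congr
  intro x hx
  rw [PySem.List.mem_pyRange_one] at hx
  simp
  intro _
  omega

-- backward scan = last table entry < s, for 0 ≤ s ≤ len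
theorem pvBackward_eq (lst : List Int) (s : Int) (h0 : 0 ≤ s) (h1 : s ≤ (lst.length : Int)) :
    pvScanA lst (PySem.List.pyRange (s - 1) (-1) (-1))
      = ((pvNz lst).reverse.find? (fun i => decide (i < s))).getD (-1) := by
  have hr : PySem.List.pyRange (s - 1) (-1) (-1) = (PySem.List.pyRange 0 s 1).reverse := by
    rw [PySem.List.pyRange_neg_one_eq_reverse]
    norm_num
  rw [pvScanA_eq_find?, hr, pvNz_eq, ← List.filter_reverse, List.find?_filter,
      PySem.List.pyRange_one_append 0 s (lst.length : Int) h0 h1,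
      List.reverse_append, List.find?_append]
  have hnone : (PySem.List.pyRange s (lst.length : Int) 1).reverse.find?
      (fun a => decide ((decide (PySem.List.pyGetD lst a 0 ≠ 0)) = true ∧ (decide (a < s)) = true)) = none := by
    rw [List.find?_eq_none]
    intro x hx
    rw [List.mem_reverse, PySem.List.mem_pyRange_one] at hx
    simp
    intro _
    omega
  rw [hnone, Option.none_or]
  congr 1
  apply pvFind?_congr
  intro x hx
  rw [List.mem_reverse, PySem.List.mem_pyRange_one] at hx
  simp
  intro _
  omega

-- membership of a tail element in the dropped suffix
theorem pvMemDrop {α : Type} (lst : List α) (d m : Nat) (h : m < lst.length) (hd : d ≤ m) :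
    lst[m] ∈ lst.drop d := by
  have h2 : m - d < (lst.drop d).length := by simp; omega
  have h3 : (lst.drop d)[m - d] = lst[m] := by
    rw [List.getElem_drop]
    have : d + (m - d) = m := by omega
    simp [this]
  rw [← h3]
  exact List.getElem_mem _

-- value at a wrapped (negative, in-range) index
theorem pvGetD_wrap (lst : List Int) (i : Int) (h0 : -(lst.length : Int) ≤ i) (h1 : i < 0) :
    PySem.List.pyGetD lst i 0 = lst.getD ((lst.length : Int) + i).toNat 0 := by
  have hk := PySem.List.pyGetD_neg_natCast lst (-i).toNat 0 (by omega) (by omega)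
  have hi : -(((-i).toNat : Nat) : Int) = i := by omega
  rw [hi] at hk
  rw [hk, List.getD_eq_getElem _ _ (by omega)]
  have : lst.length - (-i).toNat = ((lst.length : Int) + i).toNat := by omega
  simp [this]

theorem pvForward_all (lst : List Int) (s : Int)
    (hPre : Pre_find_nonzero_indices_both_1 lst s)
    (hnD : ¬ D_find_nonzero_indices_both_1 lst s) :
    pvScanA lst (PySem.List.pyRange (s + 1) (lst.length : Int) 1)
      = ((pvNz lst).find? (fun i => decide (s < i))).getD (-1) := by
  obtain ⟨hp1, hp2⟩ := hPre
  by_cases hs : 0 ≤ s + 1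
  · by_cases hsn : s + 1 ≤ (lst.length : Int)
    · exact pvForward_eq lst s hs hsn
    · -- s = len: empty range on the left, no table entry > s on the right
      rw [PySem.List.pyRange_one_eq_nil (by omega)]
      have : (pvNz lst).find? (fun i => decide (s < i)) = none := by
        rw [List.find?_eq_none]
        intro x hx
        have := pvNz_mem lst x hx
        simp
        omega
      rw [this]
      rfl
  · -- s ≤ -2: the wrapped prefix is all zero (¬D_), then a full scan = first table entry
    have hs2 : s ≤ -2 := by omega
    rw [pvScanA_eq_find?,
        PySem.List.pyRange_one_append (s+1) 0 (lst.length : Int) (by omega) (by omega),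
        List.find?_append]
    have hzero : ∀ x ∈ lst.drop (((lst.length : Int) + s + 1).toNat), x = 0 := by
      intro x hx
      by_contra hne
      exact hnD ⟨hs2, x, hx, hne⟩
    have hnone : (PySem.List.pyRange (s+1) 0 1).find?
        (fun i => decide (PySem.List.pyGetD lst i 0 ≠ 0)) = none := by
      rw [List.find?_eq_none]
      intro i hi
      rw [PySem.List.mem_pyRange_one] at hi
      simp only [decide_eq_true_eq, ne_eq, not_not]
      rw [pvGetD_wrap lst i (by omega) hi.2,
          List.getD_eq_getElem _ _ (by omega)]
      exact hzero _ (pvMemDrop lst _ _ (by omega) (by omega))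
    rw [hnone, Option.none_or, pvNz_eq, List.find?_filter]
    congr 1
    apply pvFind?_congr
    intro x hx
    rw [PySem.List.mem_pyRange_one] at hx
    simp
    intro _
    omega

theorem pvBackward_all (lst : List Int) (s : Int)
    (hPre : Pre_find_nonzero_indices_both_1 lst s) :
    pvScanA lst (PySem.List.pyRange (s - 1) (-1) (-1))
      = ((pvNz lst).reverse.find? (fun i => decide (i < s))).getD (-1) := by
  obtain ⟨hp1, hp2⟩ := hPre
  by_cases hs : 0 ≤ s
  · exact pvBackward_eq lst s hs hp2
  · rw [PySem.List.pyRange_neg_one_eq_nil (by omega)]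
    have : (pvNz lst).reverse.find? (fun i => decide (i < s)) = none := by
      rw [List.find?_eq_none]
      intro x hx
      rw [List.mem_reverse] at hx
      have := pvNz_mem lst x hx
      simp
      omega
    rw [this]
    rfl

-- ===== VERDICT (by name: the statement is the Claim_ definition above) =====
theorem find_nonzero_indices_both_1_spec : Claim_unchanged_find_nonzero_indices_both_1 := by
  intro lst s _hDom hPre hnD
  unfold find_nonzero_indices_both_1 find_nonzero_indices_both_1_alt
  rw [pvForward_all lst s hPre hnD, pvBackward_all lst s hPre]

theorem find_nonzero_indices_both_1_changed : Claim_changed_find_nonzero_indices_both_1 := by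
  unfold Claim_changed_find_nonzero_indices_both_1; decide

theorem find_nonzero_indices_both_1_tight : Claim_exact_find_nonzero_indices_both_1 := by
  intro lst s _hDom hPre hD
  obtain ⟨hp1, hp2⟩ := hPre
  obtain ⟨hs2, x, hx, hxne⟩ := hD
  -- the nonzero witness: an in-range absolute position d + k with lst[d+k] ≠ 0
  obtain ⟨k, hk, hxk⟩ := List.getElem_of_mem hx
  have hmlen : ((lst.length : Int) + s + 1).toNat + k < lst.length := by
    have := hk; simp at this; omega
  have hm : lst[((lst.length : Int) + s + 1).toNat + k]'hmlen ≠ 0 := by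
    have hge := List.getElem_drop (xs := lst) (i := ((lst.length : Int) + s + 1).toNat)
      (j := k) (h := hk)
    rw [← hge, hxk]
    exact hxne
  -- both backward values are -1 (so both outputs take the (forward, 0) branch)
  have hbA : pvScanA lst (PySem.List.pyRange (s - 1) (-1) (-1)) = -1 := by
    rw [PySem.List.pyRange_neg_one_eq_nil (by omega)]; rfl
  have hbB : ((pvNz lst).reverse.find? (fun i => decide (i < s))).getD (-1) = -1 := by
    have hn : (pvNz lst).reverse.find? (fun i => decide (i < s)) = none := by
      rw [List.find?_eq_none]
      intro y hy
      rw [List.mem_reverse] at hy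
      have := pvNz_mem lst y hy
      simp; omega
    rw [hn]; rfl
  -- A's forward is a negative (wrapped) index
  have hfa : pvScanA lst (PySem.List.pyRange (s + 1) (lst.length : Int) 1) < 0 := by
    rw [pvScanA_eq_find?,
        PySem.List.pyRange_one_append (s+1) 0 (lst.length : Int) (by omega) (by omega),
        List.find?_append]
    have hwit : ∃ i ∈ PySem.List.pyRange (s+1) 0 1,
        (fun i => decide (PySem.List.pyGetD lst i 0 ≠ 0)) i = true := by
      refine ⟨(((((lst.length : Int) + s + 1).toNat + k : Nat) : Int)) - (lst.length : Int), ?_, ?_⟩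
      · rw [PySem.List.mem_pyRange_one]; omega
      · simp only [decide_eq_true_eq]
        rw [pvGetD_wrap lst _ (by omega) (by omega)]
        have he : ((lst.length : Int) + ((((((lst.length : Int) + s + 1).toNat + k : Nat) : Int)) - (lst.length : Int))).toNat
            = ((lst.length : Int) + s + 1).toNat + k := by omega
        rw [he, List.getD_eq_getElem _ _ hmlen]
        exact hm
    rw [← List.find?_isSome] at hwit
    obtain ⟨j, hj⟩ := Option.isSome_iff_exists.mp hwit
    rw [hj]
    have hjm := List.mem_of_find?_eq_some hj
    rw [PySem.List.mem_pyRange_one] at hjm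
    simpa using hjm.2
  -- B's forward is a nonnegative index
  have hnzne : ((pvNz lst).find? (fun i => decide (s < i))).isSome = true := by
    rw [List.find?_isSome]
    refine ⟨(((((lst.length : Int) + s + 1).toNat + k : Nat) : Int)), ?_, ?_⟩
    · rw [pvNz_eq, List.mem_filter]
      refine ⟨by rw [PySem.List.mem_pyRange_one]; omega, ?_⟩
      simp only [decide_eq_true_eq]
      rw [PySem.List.pyGetD_eq_getElem lst 0 (by omega) (by exact_mod_cast hmlen)]
      have he : ((((((lst.length : Int) + s + 1).toNat + k : Nat) : Int))).toNat
          = ((lst.length : Int) + s + 1).toNat + k := by omega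
      simp only [he]
      exact hm
    · simp; omega
  have hfb : 0 ≤ ((pvNz lst).find? (fun i => decide (s < i))).getD (-1) := by
    obtain ⟨j, hj⟩ := Option.isSome_iff_exists.mp hnzne
    have := pvNz_mem lst j (List.mem_of_find?_eq_some hj)
    rw [hj]
    simp
    omega
  -- assemble: both outputs are (forward, 0) with A's forward < 0 ≤ B's forward
  unfold find_nonzero_indices_both_1 find_nonzero_indices_both_1_alt
  simp only [hbA, hbB]
  intro hEq
  have := congrArg Prod.fst hEq
  simp at this
  omega
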